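-- pv_equiv track=rewrite | github.com/narwhals-2016/realtor | infoshare.py | zip_in_nb
-- ===== SOURCE A (Python) =====
-- def zip_in_nb(nb_list, dictionary):
-- 	matches = []
-- 	missing = []
-- 	for key in dictionary:
-- 		m = [(nb, dictionary[key]) for nb in nb_list if key in nb]
-- 		if m != []:
-- 			matches.append(m)
-- 	return matches
-- ===== SOURCE B (Python) =====
-- def zip_in_nb(nb_list, dictionary):
--     # One pass over nb_list maintaining a parallel bucket per dictionary item,
--     # instead of re-scanning nb_list once per key.
--     items = list(dictionary.items())
--     buckets = [[] for _ in items]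
--     for nb in nb_list:
--         buckets = [b + [(nb, v)] if k in nb else b
--                    for (k, v), b in zip(items, buckets)]
--     return [b for b in buckets if b]
-- ===== Notes on version B (the rewrite author's own statement) =====
-- stated objective: alternative
-- what changed: A rescans nb_list once per dictionary key building each group by a comprehension; B makes a single pass over nb_list, extending a parallel bucket per dictionary item via zip, and finally keeps the nonempty buckets.
import Mathlib
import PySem

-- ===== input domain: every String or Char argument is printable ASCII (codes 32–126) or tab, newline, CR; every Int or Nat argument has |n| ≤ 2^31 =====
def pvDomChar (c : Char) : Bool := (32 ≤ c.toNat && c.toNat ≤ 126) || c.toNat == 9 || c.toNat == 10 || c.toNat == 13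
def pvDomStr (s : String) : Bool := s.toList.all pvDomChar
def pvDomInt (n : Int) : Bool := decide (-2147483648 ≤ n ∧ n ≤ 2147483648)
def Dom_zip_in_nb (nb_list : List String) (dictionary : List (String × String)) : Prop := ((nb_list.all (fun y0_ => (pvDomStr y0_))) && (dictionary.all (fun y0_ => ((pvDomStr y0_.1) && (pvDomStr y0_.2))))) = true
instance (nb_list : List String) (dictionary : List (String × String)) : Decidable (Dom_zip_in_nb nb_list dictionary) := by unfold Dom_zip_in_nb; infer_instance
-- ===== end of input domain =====

-- B replaces A's per-key rescan of nb_list by a single pass over nb_list that extends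
-- one bucket per dictionary item (objective: alternative decomposition, same cost).

-- ===== PORT A =====
-- Literal port of A: for each key of the dict (insertion order, unique keys),
-- build m = [(nb, dictionary[key]) for nb in nb_list if key in nb]; append m if nonempty.
-- dictionary[key] is total here (key comes from d.keys), ported as getD with an unused default.
def zip_in_nb (nb_list : List String) (dictionary : List (String × String)) : List (List (String × String)) :=
  let d := PySem.Dict.ofList dictionary
  d.keys.foldl
    (fun ms key =>
      let m := (nb_list.filter (fun nb => PySem.Str.isIn key nb)).map
                 (fun nb => (nb, d.getD key ""))
      if m ≠ [] then ms ++ [m] else ms)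
    []

-- ===== PORT B =====
-- Literal port of Source B: items = list(dictionary.items()); buckets start empty;
-- one pass over nb_list rebuilding the parallel bucket list via zip; keep nonempty buckets.
def zip_in_nb_alt (nb_list : List String) (dictionary : List (String × String)) : List (List (String × String)) :=
  let items := (PySem.Dict.ofList dictionary).items
  let buckets0 : List (List (String × String)) := items.map (fun _ => [])
  let buckets := nb_list.foldl
    (fun bs nb =>
      (items.zip bs).map
        (fun q => if PySem.Str.isIn q.1.1 nb then q.2 ++ [(nb, q.1.2)] else q.2))
    buckets0
  buckets.filter (fun b => !b.isEmpty)

-- ===== PRECONDITION & SPEC =====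
def Spec_zip_in_nb (nb_list : List String) (dictionary : List (String × String)) (out : List (List (String × String))) : Prop := out = zip_in_nb_alt nb_list dictionary
instance (nb_list : List String) (dictionary : List (String × String)) (out : List (List (String × String))) : Decidable (Spec_zip_in_nb nb_list dictionary out) := by unfold Spec_zip_in_nb; infer_instance

-- ===== CLAIM =====
def Claim_equal_zip_in_nb : Prop := ∀ (nb_list : List String) (dictionary : List (String × String)), Dom_zip_in_nb nb_list dictionary → Spec_zip_in_nb nb_list dictionary (zip_in_nb nb_list dictionary)

-- ===== LEMMAS AND PROOFS =====

-- B's loop invariant: folding nb_list over a bucket list of shape 'items.map g'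
-- appends to each bucket exactly the matches of the processed prefix.
theorem zip_in_nb_alt_inv (l : List String) (items : List (String × String))
    (g : (String × String) → List (String × String)) :
    l.foldl
      (fun bs nb =>
        (items.zip bs).map
          (fun q => if PySem.Str.isIn q.1.1 nb then q.2 ++ [(nb, q.1.2)] else q.2))
      (items.map g)
    = items.map (fun p =>
        g p ++ (l.filter (fun nb => PySem.Str.isIn p.1 nb)).map (fun nb => (nb, p.2))) := by
  induction l generalizing g with
  | nil => simp
  | cons nb l ih =>
    have hzip : items.zip (items.map g) = items.map (fun p => (p, g p)) := by
      simpa using List.zip_map' (f := fun p => p) (g := g) (l := items)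
    simp only [List.foldl_cons, hzip, List.map_map]
    have hstep :
        ((fun q : (String × String) × List (String × String) =>
            if PySem.Str.isIn q.1.1 nb then q.2 ++ [(nb, q.1.2)] else q.2) ∘
          fun p => (p, g p))
        = fun p => g p ++ (if PySem.Str.isIn p.1 nb then [(nb, p.2)] else []) := by
      funext p
      simp only [Function.comp_apply]
      split <;> simp
    rw [hstep, ih]
    refine List.map_congr_left (fun p _ => ?_)
    simp only [List.filter_cons]
    split <;> simp

theorem zip_in_nb_eq (nb_list : List String) (dictionary : List (String × String)) :
    zip_in_nb nb_list dictionary = zip_in_nb_alt nb_list dictionary := by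
  unfold zip_in_nb zip_in_nb_alt
  dsimp only
  set d := PySem.Dict.ofList dictionary with hd
  -- B side: evaluate the fold with the invariant (initial buckets are 'items.map (fun _ => [])')
  rw [zip_in_nb_alt_inv nb_list d.items (fun _ => [])]
  -- A side: the append-if fold is map-then-filter over keys
  have hA := PySem.List.foldl_append_if
      (fun key => decide ((nb_list.filter (fun nb => PySem.Str.isIn key nb)).map
                     (fun nb => (nb, d.getD key "")) ≠ []))
      (fun key => (nb_list.filter (fun nb => PySem.Str.isIn key nb)).map
                     (fun nb => (nb, d.getD key "")))
      d.keys []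
  simp only [decide_eq_true_eq] at hA
  rw [hA, List.nil_append]
  -- both sides become 'items.filter … .map …'
  have hkeys : d.keys = d.items.map (fun p => p.1) := by
    simp [PySem.Dict.keys]
  rw [hkeys, List.filter_map, List.map_map, List.filter_map]
  have hval : ∀ p ∈ d.items, d.getD p.1 "" = p.2 := by
    intro p hp
    exact PySem.Dict.getD_of_get?_eq_some d ""
      (PySem.Dict.get?_of_mem_items d (by exact hp) (PySem.Dict.nodup_keys_ofList dictionary))
  have hcond : ∀ p ∈ d.items,
      ((fun key => decide ((nb_list.filter (fun nb => PySem.Str.isIn key nb)).map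
            (fun nb => (nb, d.getD key "")) ≠ [])) ∘ fun p : String × String => p.1) p
      = ((fun b : List (String × String) => !b.isEmpty) ∘ fun p : String × String =>
          ([] : List (String × String)) ++
            (nb_list.filter (fun nb => PySem.Str.isIn p.1 nb)).map (fun nb => (nb, p.2))) p := by
    intro p hp
    simp only [Function.comp_apply, hval p hp, List.nil_append]
    cases hE : ((nb_list.filter (fun nb => PySem.Str.isIn p.1 nb)).map
        (fun nb => (nb, p.2))).isEmpty <;>
      simp_all [List.isEmpty_iff]
  rw [List.filter_congr hcond]
  refine List.map_congr_left (fun p hp => ?_)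
  simp [hval p (List.mem_of_mem_filter hp)]

-- ===== VERDICT =====
theorem zip_in_nb_spec : Claim_equal_zip_in_nb := by
  intro nb_list dictionary _
  unfold Spec_zip_in_nb
  exact zip_in_nb_eq nb_list dictionary
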